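-- pv_equiv track=rewrite | github.com/Averyy/mydoglog | scraper/tests/test_ingredient_families.py | parse_ingredients
-- ===== SOURCE A (Python) =====
-- def parse_ingredients(raw: str) -> list[str]:
--     """Bracket-aware comma splitting."""
--     if not raw:
--         return []
--     ingredients = []
--     current = []
--     depth = 0
--     for char in raw:
--         if char in "([":
--             depth += 1
--             current.append(char)
--         elif char in ")]":
--             depth -= 1
--             current.append(char)
--         elif char == "," and depth == 0:
--             ing = "".join(current).strip().rstrip(".")
--             if ing:
--                 ingredients.append(ing)
--             current = []
--         else:
--             current.append(char)
--     ing = "".join(current).strip().rstrip(".")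
--     if ing:
--         ingredients.append(ing)
--     return ingredients
-- ===== SOURCE B (Python) =====
-- def parse_ingredients(raw: str) -> list[str]:
--     """Bracket-aware comma splitting: split on every comma, then merge pieces
--     back together while the running bracket balance is non-zero."""
--     if not raw:
--         return []
--     ingredients = []
--     buf = []
--     bal = 0
--     for piece in raw.split(","):
--         buf.append(piece)
--         bal += sum(1 if ch in "([" else -1 if ch in ")]" else 0 for ch in piece)
--         if bal == 0:
--             ing = ",".join(buf).strip().rstrip(".")
--             if ing:
--                 ingredients.append(ing)
--             buf = []
--     if buf:
--         ing = ",".join(buf).strip().rstrip(".")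
--         if ing:
--             ingredients.append(ing)
--     return ingredients
-- ===== Notes on version B (the rewrite author's own statement) =====
-- stated objective: alternative
-- what changed: Replaces the char-by-char loop with accumulated current-segment and depth counter by a two-phase pass: split on every comma first, then merge the pieces by a running bracket balance, flushing a joined-and-cleaned segment whenever the balance returns to zero.
import Mathlib
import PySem

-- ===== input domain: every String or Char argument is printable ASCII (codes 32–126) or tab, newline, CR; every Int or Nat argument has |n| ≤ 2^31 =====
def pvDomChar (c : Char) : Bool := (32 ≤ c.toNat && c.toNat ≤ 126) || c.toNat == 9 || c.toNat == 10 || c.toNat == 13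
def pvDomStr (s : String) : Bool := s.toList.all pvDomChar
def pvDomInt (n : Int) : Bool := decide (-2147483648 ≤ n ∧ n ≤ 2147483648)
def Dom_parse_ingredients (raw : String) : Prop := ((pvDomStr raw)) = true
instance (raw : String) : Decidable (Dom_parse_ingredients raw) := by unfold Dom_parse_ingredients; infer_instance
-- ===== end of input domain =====

-- B restructures A's char-by-char depth loop into split-on-comma + merge-by-balance (objective: alternative decomposition, same cost).

-- shared idiom: "".strip().rstrip(".") — strip via PySem, rstrip('.') ported by hand
-- (exact: Python's rstrip(".") removes exactly the trailing '.' characters)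
def pvClean (cs : List Char) : List Char :=
  let t := PySem.Chars.strip cs
  (t.reverse.dropWhile (fun c => c == '.')).reverse

-- ===== PORT A =====
-- A's for-loop: state (ingredients, current, depth), one step per character
def pvGoA : List Char → List String → List Char → Int → List String
  | [], ings, cur, _ =>
      let ing := pvClean cur
      if ing ≠ [] then ings ++ [String.ofList ing] else ings
  | c :: rest, ings, cur, depth =>
      if c = '(' ∨ c = '[' then pvGoA rest ings (cur ++ [c]) (depth + 1)
      else if c = ')' ∨ c = ']' then pvGoA rest ings (cur ++ [c]) (depth - 1)
      else if c = ',' ∧ depth = 0 then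
        let ing := pvClean cur
        pvGoA rest (if ing ≠ [] then ings ++ [String.ofList ing] else ings) [] depth
      else pvGoA rest ings (cur ++ [c]) depth

def parse_ingredients (raw : String) : List String :=
  if raw = "" then [] else pvGoA raw.toList [] [] 0

-- ===== PORT B =====
-- balance of one piece: sum(1 if ch in "([" else -1 if ch in ")]" else 0 for ch in piece)
def pvBal (p : List Char) : Int :=
  p.foldl (fun a c => if c = '(' ∨ c = '[' then a + 1 else if c = ')' ∨ c = ']' then a - 1 else a) 0

-- B's for-loop over the comma-split pieces: state (ingredients, buf, bal)
def pvGoB : List (List Char) → List String → List (List Char) → Int → List String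
  | [], ings, buf, _ =>
      if buf ≠ [] then
        let ing := pvClean (PySem.Chars.join [','] buf)
        if ing ≠ [] then ings ++ [String.ofList ing] else ings
      else ings
  | p :: ps, ings, buf, bal =>
      let buf' := buf ++ [p]
      let bal' := bal + pvBal p
      if bal' = 0 then
        let ing := pvClean (PySem.Chars.join [','] buf')
        pvGoB ps (if ing ≠ [] then ings ++ [String.ofList ing] else ings) [] bal'
      else pvGoB ps ings buf' bal'

def parse_ingredients_alt (raw : String) : List String :=
  if raw = "" then [] else pvGoB (PySem.Chars.splitOn raw.toList [',']) [] [] 0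

-- ===== PRECONDITION & SPEC =====
def Spec_parse_ingredients (raw : String) (out : List String) : Prop := out = parse_ingredients_alt raw
instance (raw : String) (out : List String) : Decidable (Spec_parse_ingredients raw out) := by unfold Spec_parse_ingredients; infer_instance

-- ===== CLAIM (what is proved, stated in full; the proofs are below) =====
def Claim_equal_parse_ingredients : Prop := ∀ (raw : String), Dom_parse_ingredients raw → Spec_parse_ingredients raw (parse_ingredients raw)

-- ===== LEMMAS AND PROOFS =====

-- reference single-char comma split with a reversed accumulator for the current piece
def pvSplit : List Char → List Char → List (List Char)
  | [], cur => [cur.reverse]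
  | c :: rest, cur => if c = ',' then cur.reverse :: pvSplit rest [] else pvSplit rest (c :: cur)

lemma pvSplit_go (fuel : Nat) : ∀ (l cur : List Char) (hacc : List (List Char)),
    l.length ≤ fuel →
    PySem.Chars.splitOn.go [','] fuel l cur hacc = hacc.reverse ++ pvSplit l cur := by
  induction fuel with
  | zero =>
    intro l cur acc h
    have hl : l = [] := by cases l <;> simp at h ⊢
    subst hl
    simp [PySem.Chars.splitOn.go, pvSplit]
  | succ f ih =>
    intro l cur acc h
    cases l with
    | nil => simp [PySem.Chars.splitOn.go, pvSplit]
    | cons c rest =>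
      have hr : rest.length ≤ f := by simpa using h
      by_cases hc : c = ','
      · subst hc
        simp only [PySem.Chars.splitOn.go, pvSplit, List.isPrefixOf, if_true,
          BEq.rfl, Bool.and_self, if_pos, List.length_cons, List.drop_succ_cons,
          List.length_nil, List.drop_zero]
        rw [ih rest [] (cur.reverse :: acc) hr]
        simp [pvSplit]
      · have hpre : [','].isPrefixOf (c :: rest) = false := by
          simp [List.isPrefixOf]
          intro hh
          exact absurd hh.symm hc
        simp only [PySem.Chars.splitOn.go, hpre, Bool.false_eq_true, if_false]
        rw [ih rest (c :: cur) acc hr]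
        simp [pvSplit, hc]

lemma splitOn_eq (cs : List Char) : PySem.Chars.splitOn cs [','] = pvSplit cs [] := by
  unfold PySem.Chars.splitOn
  rw [pvSplit_go (cs.length + 1) cs [] [] (by omega)]
  simp

lemma join_cons_ne_nil (p : List Char) (l : List (List Char)) (h : l ≠ []) :
    PySem.Chars.join [','] (p :: l) = p ++ ',' :: PySem.Chars.join [','] l := by
  cases l with
  | nil => exact absurd rfl h
  | cons q t => simp [PySem.Chars.join, List.intercalate]

lemma join_singleton_nil : PySem.Chars.join [','] [[]] = [] := by
  simp [PySem.Chars.join, List.intercalate]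

lemma join_append_last (buf : List (List Char)) (pre x : List Char) :
    PySem.Chars.join [','] (buf ++ [pre]) ++ x = PySem.Chars.join [','] (buf ++ [pre ++ x]) := by
  induction buf with
  | nil => simp [PySem.Chars.join, List.intercalate]
  | cons p ps ih =>
    rw [List.cons_append, List.cons_append,
      join_cons_ne_nil p (ps ++ [pre]) (by simp),
      join_cons_ne_nil p (ps ++ [pre ++ x]) (by simp)]
    simp [ih]

lemma join_append_nil (l : List (List Char)) (h : l ≠ []) :
    PySem.Chars.join [','] (l ++ [([] : List Char)]) = PySem.Chars.join [','] l ++ [','] := by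
  induction l with
  | nil => exact absurd rfl h
  | cons p ps ih =>
    cases ps with
    | nil => simp [PySem.Chars.join, List.intercalate]
    | cons q t =>
      rw [List.cons_append, join_cons_ne_nil p ((q :: t) ++ [([] : List Char)]) (by simp),
        join_cons_ne_nil p (q :: t) (by simp), ih (by simp)]
      simp

lemma pvBal_append_singleton (pre : List Char) (c : Char) :
    pvBal (pre ++ [c]) = pvBal pre +
      (if c = '(' ∨ c = '[' then 1 else if c = ')' ∨ c = ']' then -1 else 0) := by
  simp only [pvBal, List.foldl_append, List.foldl_cons, List.foldl_nil]
  split_ifs <;> omega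

lemma pvMain (cs : List Char) : ∀ (ings : List String) (buf : List (List Char)) (pre : List Char) (b : Int),
    pvGoB (pvSplit cs pre.reverse) ings buf b =
    pvGoA cs ings (PySem.Chars.join [','] (buf ++ [pre])) (b + pvBal pre) := by
  induction cs with
  | nil =>
    intro ings buf pre b
    have hs : pvSplit ([] : List Char) pre.reverse = [pre] := by simp [pvSplit]
    rw [hs]
    by_cases hb : b + pvBal pre = 0
    · simp [pvGoB, pvGoA, hb]
    · simp [pvGoB, pvGoA, hb]
  | cons c rest ih =>
    intro ings buf pre b
    by_cases h1 : c = '(' ∨ c = '['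
    · have hc : c ≠ ',' := by rcases h1 with h | h <;> subst h <;> decide
      have hsplit : pvSplit (c :: rest) pre.reverse = pvSplit rest ((pre ++ [c]).reverse) := by
        simp [pvSplit, hc]
      rw [hsplit, ih ings buf (pre ++ [c]) b]
      have : b + pvBal (pre ++ [c]) = b + pvBal pre + 1 := by
        rw [pvBal_append_singleton]; simp [h1]; ring
      rw [this, ← join_append_last]
      simp [pvGoA, h1]
    · by_cases h2 : c = ')' ∨ c = ']'
      · have hc : c ≠ ',' := by rcases h2 with h | h <;> subst h <;> decide
        have hsplit : pvSplit (c :: rest) pre.reverse = pvSplit rest ((pre ++ [c]).reverse) := by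
          simp [pvSplit, hc]
        rw [hsplit, ih ings buf (pre ++ [c]) b]
        have : b + pvBal (pre ++ [c]) = b + pvBal pre - 1 := by
          rw [pvBal_append_singleton]; simp [h1, h2]; ring
        rw [this, ← join_append_last]
        simp [pvGoA, h1, h2]
      · by_cases h3 : c = ','
        · subst h3
          have hsplit : pvSplit (',' :: rest) pre.reverse = pre :: pvSplit rest [] := by
            simp [pvSplit]
          rw [hsplit]
          by_cases hd : b + pvBal pre = 0
          · simp only [pvGoB, hd, if_pos]
            rw [show (pvSplit rest [] : List (List Char)) = pvSplit rest ([] : List Char).reverse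
                from by simp, ih]
            simp [pvGoA, join_singleton_nil, pvBal]
          · simp only [pvGoB, hd, if_false]
            rw [show (pvSplit rest [] : List (List Char)) = pvSplit rest ([] : List Char).reverse
                from by simp, ih]
            rw [join_append_nil (buf ++ [pre]) (by simp)]
            conv_rhs => simp only [pvGoA]
            rw [if_neg (show ¬(True ∧ b + pvBal pre = 0) by simp [hd])]
            simp [pvBal]
        · have hsplit : pvSplit (c :: rest) pre.reverse = pvSplit rest ((pre ++ [c]).reverse) := by
            simp [pvSplit, h3]
          rw [hsplit, ih ings buf (pre ++ [c]) b]
          have : b + pvBal (pre ++ [c]) = b + pvBal pre := by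
            rw [pvBal_append_singleton]; simp [h1, h2]
          rw [this, ← join_append_last]
          simp [pvGoA, h1, h2, h3]

-- ===== VERDICT (by name: the statement is the Claim_ definition above) =====
theorem parse_ingredients_spec : Claim_equal_parse_ingredients := by
  intro raw _
  unfold Spec_parse_ingredients parse_ingredients parse_ingredients_alt
  by_cases h : raw = ""
  · simp [h]
  · simp only [h, if_false]
    rw [splitOn_eq]
    have := pvMain raw.toList [] [] [] 0
    simpa [join_singleton_nil, pvBal] using this.symm
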